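-- pv_equiv track=rewrite | github.com/mldeod/hierarchy-validator | modules/hierarchy_validator/whitespace_visualizer.py | visualize_whitespace
-- ===== SOURCE A (Python) =====
-- def visualize_whitespace(text, dark_mode=False):
--     """
--     Convert text to HTML with highlighted PROBLEM spaces only
--
--     Args:
--         text: String to visualize
--         dark_mode: Boolean for dark mode colors
--
--     Returns:
--         HTML string with problem spaces highlighted in red backgrounds with dots
--     """
--     if dark_mode:
--         space_bg = "#FF6B6B"
--         space_border = "#FF4444"
--         text_color = "#E0E0E0"
--     else:
--         space_bg = "#FFE5E5"
--         space_border = "#FF9999"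
--         text_color = "#333333"
--
--     result = ""
--     for i, char in enumerate(text):
--         if char == ' ':
--             # Check if this space is a PROBLEM space
--             is_problem = False
--
--             # Leading space (position 0)
--             if i == 0:
--                 is_problem = True
--             # Trailing space (last position)
--             elif i == len(text) - 1:
--                 is_problem = True
--             # First space of a multi-space sequence
--             elif i < len(text) - 1 and text[i + 1] == ' ':
--                 is_problem = True
--             # Skip second/third/etc spaces in sequence (already highlighted the first)
--             elif i > 0 and text[i - 1] == ' ':
--                 is_problem = False  # Don't highlight - previous space already highlighted
--
--             if is_problem:
--                 result += f'<span style="background-color: {space_bg}; border: 1px solid {space_border}; padding: 0 2px;">·</span>'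
--             else:
--                 # Normal space - just show the dot without highlighting
--                 result += '·'
--         elif char == '\t':
--             # Tab character - always a problem!
--             result += f'<span style="background-color: {space_bg}; border: 1px solid {space_border}; padding: 0 2px;">⇥</span>'
--         else:
--             result += char
--
--     return f'<span style="font-family: monospace; font-size: 14px; color: {text_color};">{result}</span>'
-- ===== SOURCE B (Python) =====
-- def visualize_whitespace(text, dark_mode=False):
--     """Run-based re-implementation: scans maximal runs of identical characters
--     instead of doing per-character neighbour index lookups."""
--     if dark_mode:
--         space_bg, space_border, text_color = "#FF6B6B", "#FF4444", "#E0E0E0"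
--     else:
--         space_bg, space_border, text_color = "#FFE5E5", "#FF9999", "#333333"
--     hl = f'<span style="background-color: {space_bg}; border: 1px solid {space_border}; padding: 0 2px;">'
--     n = len(text)
--     parts = []
--     i = 0
--     while i < n:
--         c = text[i]
--         j = i + 1
--         while j < n and text[j] == c:
--             j += 1
--         if c == ' ':
--             # all but the last space of a run precede a space -> problem;
--             # the last one is a problem only at the very start or very end
--             parts.append((hl + '\u00b7</span>') * (j - i - 1))
--             if j - 1 == 0 or j == n:
--                 parts.append(hl + '\u00b7</span>')
--             else:
--                 parts.append('\u00b7')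
--         elif c == '\t':
--             parts.append((hl + '\u21e5</span>') * (j - i))
--         else:
--             parts.append(c * (j - i))
--         i = j
--     body = ''.join(parts)
--     return f'<span style="font-family: monospace; font-size: 14px; color: {text_color};">{body}</span>'
-- ===== Notes on version B (the rewrite author's own statement) =====
-- stated objective: alternative
-- what changed: B scans the text once over maximal runs of identical characters and joins per-run pieces, instead of A's per-character loop that classifies each space by indexing its left and right neighbours; the last space of a run is highlighted exactly when it is the first or last character of the text.
import Mathlib
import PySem

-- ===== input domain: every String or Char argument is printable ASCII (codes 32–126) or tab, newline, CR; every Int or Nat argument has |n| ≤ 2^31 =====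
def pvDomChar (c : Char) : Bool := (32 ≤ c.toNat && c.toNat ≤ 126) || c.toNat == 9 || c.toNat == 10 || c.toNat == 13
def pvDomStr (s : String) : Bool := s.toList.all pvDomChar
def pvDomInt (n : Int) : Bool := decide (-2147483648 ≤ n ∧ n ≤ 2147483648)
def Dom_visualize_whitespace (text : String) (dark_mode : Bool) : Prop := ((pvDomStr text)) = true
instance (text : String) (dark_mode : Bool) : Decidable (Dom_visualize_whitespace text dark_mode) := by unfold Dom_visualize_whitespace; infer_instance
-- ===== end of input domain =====

-- B rewrites A's per-character scan (with neighbour index lookups) as a single scan over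
-- maximal runs of identical characters; same output, alternative structure.

-- shared literal fragments (both Pythons build these same f-string pieces)
def vwHL (bg bd : List Char) : List Char :=
  "<span style=\"background-color: ".toList ++ bg ++ "; border: 1px solid ".toList ++ bd ++ "; padding: 0 2px;\">".toList
def vwDotClose : List Char := "·</span>".toList
def vwTabClose : List Char := "⇥</span>".toList
def vwOuterPre (color : List Char) : List Char :=
  "<span style=\"font-family: monospace; font-size: 14px; color: ".toList ++ color ++ ";\">".toList
def vwClose : List Char := "</span>".toList

-- ===== PORT A =====
-- the body of A's `for i, char in enumerate(text)` loop, step for step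
def vwStepA (hl : List Char) (cs : List Char) (result : List Char) (ic : Int × Char) : List Char :=
  let n : Int := cs.length
  let i := ic.1
  let char := ic.2
  if char = ' ' then
    let is_problem : Bool :=
      if i = 0 then true
      else if i = n - 1 then true
      else if i < n - 1 ∧ PySem.List.pyGet? cs (i + 1) = some ' ' then true
      else if 0 < i ∧ PySem.List.pyGet? cs (i - 1) = some ' ' then false
      else false
    if is_problem then result ++ (hl ++ vwDotClose) else result ++ ['·']
  else if char = '\t' then result ++ (hl ++ vwTabClose)
  else result ++ [char]

def visualize_whitespace (text : String) (dark_mode : Bool) : String :=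
  let space_bg := (if dark_mode then "#FF6B6B" else "#FFE5E5").toList
  let space_border := (if dark_mode then "#FF4444" else "#FF9999").toList
  let text_color := (if dark_mode then "#E0E0E0" else "#333333").toList
  let cs := text.toList
  let result := (PySem.List.enumerate cs 0).foldl (vwStepA (vwHL space_bg space_border) cs) []
  String.ofList (vwOuterPre text_color ++ result ++ vwClose)

-- ===== PORT B =====
-- B's outer `while i < n` loop over maximal runs; the inner `while j < n and text[j] == c`
-- scan is the takeWhile over the rest of the suffix
def vwAltLoop (hl : List Char) (n : Nat) : List Char → Nat → List Char
  | [], _ => []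
  | c :: rest, i =>
    let t := rest.takeWhile (fun x => x == c)
    let j := i + 1 + t.length
    let rest' := rest.drop t.length
    let piece :=
      if c = ' ' then
        (List.replicate (j - i - 1) (hl ++ vwDotClose)).flatten ++
          (if j - 1 = 0 || j = n then hl ++ vwDotClose else ['·'])
      else if c = '\t' then (List.replicate (j - i) (hl ++ vwTabClose)).flatten
      else List.replicate (j - i) c
    piece ++ vwAltLoop hl n rest' j
termination_by cs _ => cs.length
decreasing_by simp only [List.length_drop, List.length_cons]; omega

def visualize_whitespace_alt (text : String) (dark_mode : Bool) : String :=
  let space_bg := (if dark_mode then "#FF6B6B" else "#FFE5E5").toList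
  let space_border := (if dark_mode then "#FF4444" else "#FF9999").toList
  let text_color := (if dark_mode then "#E0E0E0" else "#333333").toList
  let cs := text.toList
  let body := vwAltLoop (vwHL space_bg space_border) cs.length cs 0
  String.ofList (vwOuterPre text_color ++ body ++ vwClose)

-- ===== PRECONDITION & SPEC =====
def Spec_visualize_whitespace (text : String) (dark_mode : Bool) (out : String) : Prop := out = visualize_whitespace_alt text dark_mode
instance (text : String) (dark_mode : Bool) (out : String) : Decidable (Spec_visualize_whitespace text dark_mode out) := by unfold Spec_visualize_whitespace; infer_instance

-- ===== CLAIM (what is proved, stated in full; the proofs are below) =====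
def Claim_equal_visualize_whitespace : Prop := ∀ (text : String) (dark_mode : Bool), Dom_visualize_whitespace text dark_mode → Spec_visualize_whitespace text dark_mode (visualize_whitespace text dark_mode)

-- ===== LEMMAS AND PROOFS =====

-- A's per-character decision, re-expressed on the current suffix (next char = rest.head?)
def vwPhi (hlDot hlTab : List Char) (n : Nat) : List Char → Nat → List Char
  | [], _ => []
  | c :: rest, i =>
    (if c = ' ' then
        (if i = 0 ∨ i = n - 1 ∨ rest.head? = some ' ' then hlDot else ['·'])
     else if c = '\t' then hlTab
     else [c]) ++ vwPhi hlDot hlTab n rest (i + 1)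

theorem vw_fold_eq_phi (hl : List Char) (cs : List Char) :
    ∀ (suffix : List Char) (i : Nat) (acc : List Char), cs.drop i = suffix →
      (PySem.List.enumerate suffix (i : Int)).foldl (vwStepA hl cs) acc
        = acc ++ vwPhi (hl ++ vwDotClose) (hl ++ vwTabClose) cs.length suffix i := by
  intro suffix
  induction suffix with
  | nil => intro i acc h; simp [PySem.List.enumerate_nil, vwPhi]
  | cons c rest ih =>
    intro i acc h
    have hi1 : cs.drop (i + 1) = rest := by rw [← List.tail_drop, h]; rfl
    have hlen : cs.length - i = rest.length + 1 := by
      have := congrArg List.length h; simpa using this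
    have hi : i < cs.length := by omega
    have hnext : cs[i + 1]? = rest.head? := by rw [← List.head?_drop, hi1]
    have hcast : ((i : Int) + 1) = ((i + 1 : Nat) : Int) := by push_cast; ring
    have hstep : vwStepA hl cs acc ((i : Int), c)
        = acc ++ (if c = ' ' then
            (if i = 0 ∨ i = cs.length - 1 ∨ rest.head? = some ' '
              then hl ++ vwDotClose else ['·'])
          else if c = '\t' then hl ++ vwTabClose else [c]) := by
      by_cases hc : c = ' '
      · by_cases h0 : i = 0
        · simp [vwStepA, hc, h0]
        · have h0' : ((i : Int)) ≠ 0 := by exact_mod_cast h0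
          by_cases h1 : i = cs.length - 1
          · have h1' : ((cs.length - 1 : Nat) : Int) = (cs.length : Int) - 1 := by omega
            simp [vwStepA, hc, h1, h1']
          · have h1' : ((i : Int)) ≠ (cs.length : Int) - 1 := by omega
            have hlt : ((i : Int)) < (cs.length : Int) - 1 := by omega
            have hget : PySem.List.pyGet? cs ((i : Int) + 1) = rest.head? := by
              rw [hcast, PySem.List.pyGet?_natCast, hnext]
            by_cases hs : rest.head? = some ' '
            · simp [vwStepA, hc, h1', hlt, hget, hs, h0, h1]
            · simp [vwStepA, hc, h1', hget, hs, h0, h1]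
      · by_cases ht : c = '\t' <;> simp [vwStepA, hc, ht]
    rw [PySem.List.enumerate_cons, List.foldl_cons, hstep, hcast, ih (i + 1) _ hi1]
    simp [vwPhi, List.append_assoc]

theorem vw_drop_takeWhile (p : Char → Bool) (l : List Char) :
    l.drop (l.takeWhile p).length = l.dropWhile p := by
  induction l with
  | nil => rfl
  | cons a l ih => by_cases h : p a <;> simp [h, ih]

theorem vw_head_dropWhile (p : Char → Bool) (l : List Char) (c : Char)
    (h : (l.dropWhile p).head? = some c) : p c = false := by
  induction l with
  | nil => simp at h
  | cons a l ih =>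
    rw [List.dropWhile_cons] at h
    split at h
    · exact ih h
    · simp_all

theorem vw_phi_space_run (hlDot hlTab : List Char) (n : Nat) :
    ∀ (k : Nat) (r' : List Char) (i : Nat), r'.head? ≠ some ' ' → i + k + 1 ≤ n →
      vwPhi hlDot hlTab n (List.replicate (k + 1) ' ' ++ r') i
        = (List.replicate k hlDot).flatten
            ++ (if i + k = 0 ∨ i + k + 1 = n then hlDot else ['·'])
            ++ vwPhi hlDot hlTab n r' (i + k + 1) := by
  intro k
  induction k with
  | zero =>
    intro r' i hr' hn
    have hiff : (i = 0 ∨ i = n - 1 ∨ r'.head? = some ' ') ↔ (i + 0 = 0 ∨ i + 0 + 1 = n) := by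
      simp only [hr', or_false]; omega
    simp only [List.replicate_succ, List.replicate_zero, List.nil_append, List.cons_append,
      vwPhi, List.flatten_nil, Nat.add_zero]
    rw [if_congr hiff rfl rfl]
    simp
  | succ k ih =>
    intro r' i hr' hn
    have e1 : i + 1 + k = i + (k + 1) := by omega
    have hstep := ih r' (i + 1) hr' (by omega)
    rw [e1] at hstep
    simp only [List.replicate_succ, List.cons_append, vwPhi, List.head?_append,
      List.head?_replicate] at *
    rw [hstep]
    simp [List.append_assoc]

theorem vw_phi_tab_run (hlDot hlTab : List Char) (n : Nat) :
    ∀ (k : Nat) (r' : List Char) (i : Nat),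
      vwPhi hlDot hlTab n (List.replicate k '\t' ++ r') i
        = (List.replicate k hlTab).flatten ++ vwPhi hlDot hlTab n r' (i + k) := by
  intro k
  induction k with
  | zero => intro r' i; simp
  | succ k ih =>
    intro r' i
    have e1 : i + 1 + k = i + (k + 1) := by omega
    have hstep := ih r' (i + 1)
    rw [e1] at hstep
    simp only [List.replicate_succ, List.cons_append, vwPhi]
    rw [hstep]
    simp [List.append_assoc]

theorem vw_phi_char_run (hlDot hlTab : List Char) (n : Nat) (c : Char)
    (hc1 : c ≠ ' ') (hc2 : c ≠ '\t') :
    ∀ (k : Nat) (r' : List Char) (i : Nat),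
      vwPhi hlDot hlTab n (List.replicate k c ++ r') i
        = List.replicate k c ++ vwPhi hlDot hlTab n r' (i + k) := by
  intro k
  induction k with
  | zero => intro r' i; simp
  | succ k ih =>
    intro r' i
    have e1 : i + 1 + k = i + (k + 1) := by omega
    have hstep := ih r' (i + 1)
    rw [e1] at hstep
    simp only [List.replicate_succ, List.cons_append, vwPhi]
    rw [hstep]
    simp [hc1, hc2]

theorem vw_phi_eq_alt (hl : List Char) (n : Nat) :
    ∀ (m : Nat) (cs : List Char) (i : Nat), cs.length ≤ m → i + cs.length = n →
      vwPhi (hl ++ vwDotClose) (hl ++ vwTabClose) n cs i = vwAltLoop hl n cs i := by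
  intro m
  induction m with
  | zero =>
    intro cs i hm hn
    cases cs with
    | nil => simp [vwPhi, vwAltLoop]
    | cons c rest => simp at hm
  | succ m ihm =>
    intro cs i hm hn
    cases cs with
    | nil => simp [vwPhi, vwAltLoop]
    | cons c rest =>
      have htr : rest.drop (rest.takeWhile (fun x => x == c)).length
          = rest.dropWhile (fun x => x == c) := vw_drop_takeWhile _ _
      have hsplit : rest = rest.takeWhile (fun x => x == c) ++ rest.dropWhile (fun x => x == c) :=
        (List.takeWhile_append_dropWhile).symm
      have htc : rest.takeWhile (fun x => x == c)
          = List.replicate (rest.takeWhile (fun x => x == c)).length c := by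
        apply List.eq_replicate_of_mem
        intro b hb
        have hb1 := List.mem_takeWhile_imp (p := fun x => x == c) hb
        have hb2 : (b == c) = true := hb1
        exact eq_of_beq hb2
      have hhead : (rest.dropWhile (fun x => x == c)).head? ≠ some c := by
        intro hh
        have h2 := vw_head_dropWhile _ _ _ hh
        rw [beq_self_eq_true] at h2
        exact absurd h2 (by decide)
      have hklen : (rest.takeWhile (fun x => x == c)).length
            + (rest.dropWhile (fun x => x == c)).length = rest.length := by
        have h := congrArg List.length hsplit
        rw [List.length_append] at h
        omega
      have hm' : rest.length ≤ m := by simpa using hm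
      have hn' : i + rest.length + 1 = n := by simp at hn; omega
      have hcs : c :: rest
          = List.replicate ((rest.takeWhile (fun x => x == c)).length + 1) c
              ++ rest.dropWhile (fun x => x == c) := by
        conv_lhs => rw [hsplit, htc]
        simp [List.replicate_succ]
      have hrec : vwPhi (hl ++ vwDotClose) (hl ++ vwTabClose) n
            (rest.dropWhile (fun x => x == c)) (i + 1 + (rest.takeWhile (fun x => x == c)).length)
          = vwAltLoop hl n (rest.dropWhile (fun x => x == c))
              (i + 1 + (rest.takeWhile (fun x => x == c)).length) :=
        ihm _ _ (by omega) (by omega)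
      rw [vwAltLoop]
      simp only [← htr] at hsplit hhead hklen hcs hrec ⊢
      by_cases hc : c = ' '
      · subst hc
        rw [hcs, vw_phi_space_run _ _ _ _ _ _ hhead (by omega)]
        have hco : (i + 1 + (rest.takeWhile (fun x => x == ' ')).length)
              - i - 1 = (rest.takeWhile (fun x => x == ' ')).length := by omega
        simp only [hco]
        have e2 : i + (rest.takeWhile (fun x => x == ' ')).length + 1
            = i + 1 + (rest.takeWhile (fun x => x == ' ')).length := by omega
        rw [e2, hrec]
        have hiff : (i + (rest.takeWhile (fun x => x == ' ')).length = 0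
              ∨ i + 1 + (rest.takeWhile (fun x => x == ' ')).length = n)
            ↔ ((decide (i + 1 + (rest.takeWhile (fun x => x == ' ')).length - 1 = 0)
              || decide (i + 1 + (rest.takeWhile (fun x => x == ' ')).length = n)) = true) := by
          simp
        rw [if_congr hiff rfl rfl]
        simp [List.append_assoc]
      · by_cases ht : c = '\t'
        · subst ht
          rw [hcs, vw_phi_tab_run]
          have hco : (i + 1 + (rest.takeWhile (fun x => x == '\t')).length) - i
              = (rest.takeWhile (fun x => x == '\t')).length + 1 := by omega
          have e2 : i + ((rest.takeWhile (fun x => x == '\t')).length + 1)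
              = i + 1 + (rest.takeWhile (fun x => x == '\t')).length := by omega
          rw [e2, hrec]
          simp [hco]
        · rw [hcs, vw_phi_char_run _ _ _ _ hc ht]
          have hco : (i + 1 + (rest.takeWhile (fun x => x == c)).length) - i
              = (rest.takeWhile (fun x => x == c)).length + 1 := by omega
          have e2 : i + ((rest.takeWhile (fun x => x == c)).length + 1)
              = i + 1 + (rest.takeWhile (fun x => x == c)).length := by omega
          rw [e2, hrec]
          simp [hc, ht, hco]

-- ===== VERDICT (by name: the statement is the Claim_ definition above) =====
theorem visualize_whitespace_spec : Claim_equal_visualize_whitespace := by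
  intro text dark_mode _
  unfold Spec_visualize_whitespace visualize_whitespace visualize_whitespace_alt
  have h := vw_fold_eq_phi (vwHL (if dark_mode then "#FF6B6B" else "#FFE5E5").toList
      (if dark_mode then "#FF4444" else "#FF9999").toList) text.toList text.toList 0 [] rfl
  have h2 := vw_phi_eq_alt (vwHL (if dark_mode then "#FF6B6B" else "#FFE5E5").toList
      (if dark_mode then "#FF4444" else "#FF9999").toList) text.toList.length
      text.toList.length text.toList 0 le_rfl (by omega)
  simp only [Int.natCast_zero] at h
  simp only [h, h2, List.nil_append]
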